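-- pv_equiv track=rewrite | github.com/ryanliupie/Python-Learning | src/cps_109/labs/lab4_funcs.py | sumsquares
-- ===== SOURCE A (Python) =====
-- def sumsquares(n):
--
--     '''
--     This function should calculate and return the sum of the
--     first n squares, where n >= 0. Assume that 1 is the first
--     square.
--
--     For example, if n is 5, then the sum would be:
--
--     1 + 4 + 9 + 16 + 25 = 55
--
--     FOOD FOR THOUGHT:
--     How much code from your solution to the previous question
--     can be reused? Work smart. It's not plagiarism if it's your
--     own code you wrote previously!
--
--     '''
--
--     if n >= 0:
--         sum_squares = []
--         counter = 0
--
--         for i in range(1, n + 1):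
--             sum_squares.append(i)
--
--         for num in sum_squares:
--             counter = counter + (num ** 2)
--         return counter
-- ===== SOURCE B (Python) =====
-- def sumsquares(n):
--     if n >= 0:
--         return n * (n + 1) * (2 * n + 1) // 6
-- ===== Notes on version B (the rewrite author's own statement) =====
-- stated objective: faster
-- what changed: Replaces A's list-building loop plus summing loop with the closed-form n(n+1)(2n+1)//6.
import Mathlib
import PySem

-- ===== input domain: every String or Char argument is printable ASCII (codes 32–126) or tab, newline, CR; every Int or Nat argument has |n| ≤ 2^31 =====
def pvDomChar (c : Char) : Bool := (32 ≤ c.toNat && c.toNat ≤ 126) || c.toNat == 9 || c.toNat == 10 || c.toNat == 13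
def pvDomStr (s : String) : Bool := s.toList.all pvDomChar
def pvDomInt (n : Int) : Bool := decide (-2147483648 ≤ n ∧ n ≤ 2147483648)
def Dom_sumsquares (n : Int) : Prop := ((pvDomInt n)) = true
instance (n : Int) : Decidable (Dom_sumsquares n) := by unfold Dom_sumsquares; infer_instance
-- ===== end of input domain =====

-- B replaces A's two loops with the closed form n(n+1)(2n+1)//6 (O(1) vs O(n)).

-- ===== PORT A =====
-- A: build the list [1..n] by appending, then sum the squares with a second loop.
-- (for n < 0 the Python returns None, excluded by Pre_; the port returns 0 there)
def sumsquares (n : Int) : Int :=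
  if n ≥ 0 then
    let sum_squares : List Int :=
      (PySem.List.pyRange 1 (n + 1) 1).foldl (fun l i => l ++ [i]) []
    sum_squares.foldl (fun counter num => counter + num ^ 2) 0
  else 0

-- ===== PORT B =====
def sumsquares_alt (n : Int) : Int :=
  if n ≥ 0 then PySem.Int.floordiv (n * (n + 1) * (2 * n + 1)) 6 else 0

-- ===== PRECONDITION & SPEC =====
-- Pre_ excludes n < 0, where the Python A (and B) falls off the function and returns None, not an int.
def Pre_sumsquares (n : Int) : Prop := 0 ≤ n
instance (n : Int) : Decidable (Pre_sumsquares n) := by unfold Pre_sumsquares; infer_instance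
def pvWitness_sumsquares : Int := (5)

def Spec_sumsquares (n : Int) (out : Int) : Prop := out = sumsquares_alt n
instance (n : Int) (out : Int) : Decidable (Spec_sumsquares n out) := by unfold Spec_sumsquares; infer_instance

-- ===== CLAIM (what is proved, stated in full; the proofs are below) =====
def Claim_equal_sumsquares : Prop := ∀ (n : Int), Dom_sumsquares n → Pre_sumsquares n → Spec_sumsquares n (sumsquares n)

-- ===== LEMMAS AND PROOFS =====

theorem foldl_snoc_id (xs : List Int) (init : List Int) :
    xs.foldl (fun l i => l ++ [i]) init = init ++ xs := by
  induction xs generalizing init with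
  | nil => simp
  | cons x xs ih => simp [List.foldl, ih]

theorem sumsq_pyRange (k : Nat) :
    (PySem.List.pyRange 1 ((k : Int) + 1) 1).foldl (fun c x => c + x ^ 2) 0
      = PySem.Int.floordiv ((k : Int) * (k + 1) * (2 * k + 1)) 6 := by
  have key : ∀ m : Nat,
      6 * (PySem.List.pyRange 1 ((m : Int) + 1) 1).foldl (fun c x => c + x ^ 2) 0
        = (m : Int) * (m + 1) * (2 * m + 1) := by
    intro m
    induction m with
    | zero => simp [PySem.List.pyRange_one_eq_nil]
    | succ m ih =>
      have h : PySem.List.pyRange 1 ((m : Int) + 1 + 1) 1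
          = PySem.List.pyRange 1 ((m : Int) + 1) 1 ++ [(m : Int) + 1] :=
        PySem.List.pyRange_one_succ_right (by omega)
      push_cast
      push_cast at ih
      rw [h, List.foldl_append]
      simp only [List.foldl]
      ring_nf
      ring_nf at ih
      omega
  have h6 := key k
  have hd : PySem.Int.floordiv ((k : Int) * (k + 1) * (2 * k + 1)) 6
      = (k : Int) * (k + 1) * (2 * k + 1) / 6 :=
    PySem.Int.floordiv_eq_ediv_of_pos (by norm_num)
  rw [hd, ← h6]
  omega

-- ===== VERDICT (by name: the statement is the Claim_ definition above) =====
theorem sumsquares_spec : Claim_equal_sumsquares := by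
  intro n _ hpre
  unfold Spec_sumsquares sumsquares sumsquares_alt
  have hn : (0 : Int) ≤ n := hpre
  rw [if_pos hn, if_pos hn]
  obtain ⟨k, rfl⟩ := Int.eq_ofNat_of_zero_le hn
  rw [foldl_snoc_id]
  simpa using sumsq_pyRange k
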